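-- pv_equiv track=rewrite | github.com/owid/etl | etl/steps/data/garden/ember/2023-07-10/shared.py | _expand_combinations_in_amendments
-- ===== SOURCE A (Python) =====
-- import itertools
-- from typing import Any, Dict, List, Optional, Tuple, Union
--
-- def _expand_combinations_in_amendments(
--     amendments: List[Tuple[Dict[Any, Any], Dict[Any, Any]]]
-- ) -> List[Tuple[Dict[Any, Any], Dict[Any, Any]]]:
--     """When values in amendments are given as lists, explode them to have all possible combinations of values."""
--     amendments_expanded = []
--     for wrong_row, corrected_row in amendments:
--         field, values = zip(*wrong_row.items())
--         for amendment_single in [dict(zip(field, value)) for value in itertools.product(*values)]: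
--             amendments_expanded.append((amendment_single, corrected_row))
--
--     return amendments_expanded
-- ===== SOURCE B (Python) =====
-- def _expand_combinations_in_amendments(amendments):
--     """Mixed-radix index enumeration: instead of materialising the Cartesian
--     product, enumerate combination indices 0..total-1 and decode each index
--     into one value per field (last field varies fastest)."""
--     amendments_expanded = []
--     for wrong_row, corrected_row in amendments:
--         field, values = zip(*wrong_row.items())
--         sizes = [len(v) for v in values]
--         total = 1
--         for s in sizes:
--             total *= s
--         for i in range(total):
--             row = {}
--             for k in range(len(values)):
--                 stride = 1
--                 for s in sizes[k + 1:]: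
--                     stride *= s
--                 row[field[k]] = values[k][(i // stride) % sizes[k]]
--             amendments_expanded.append((row, corrected_row))
--     return amendments_expanded
-- ===== Notes on version B (the rewrite author's own statement) =====
-- stated objective: alternative
-- what changed: Replaces itertools.product with mixed-radix index enumeration: per amendment it computes total = product of the value-list lengths and decodes each index i in range(total) into one value per field via (i // stride) % size, building each dict directly instead of materialising the Cartesian product; Pre_ excludes amendments containing an empty wrong_row, where both A and B raise ValueError at the zip(*...) unpack.
import Mathlib
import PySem

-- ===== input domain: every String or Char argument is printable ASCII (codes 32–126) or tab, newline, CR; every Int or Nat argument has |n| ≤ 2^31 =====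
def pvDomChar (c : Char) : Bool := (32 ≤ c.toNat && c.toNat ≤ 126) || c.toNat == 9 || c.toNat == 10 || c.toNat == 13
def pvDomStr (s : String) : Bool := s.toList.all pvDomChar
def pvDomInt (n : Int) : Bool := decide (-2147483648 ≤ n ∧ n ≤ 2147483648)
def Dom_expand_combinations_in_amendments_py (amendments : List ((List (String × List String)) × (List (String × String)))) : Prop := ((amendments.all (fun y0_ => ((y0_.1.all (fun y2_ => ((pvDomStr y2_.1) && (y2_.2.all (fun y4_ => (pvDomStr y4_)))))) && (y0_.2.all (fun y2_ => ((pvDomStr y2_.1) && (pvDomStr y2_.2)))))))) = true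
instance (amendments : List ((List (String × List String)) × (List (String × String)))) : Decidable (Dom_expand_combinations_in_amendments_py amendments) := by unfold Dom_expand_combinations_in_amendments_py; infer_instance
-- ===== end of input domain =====

-- B enumerates combination indices 0..total-1 and decodes each index mixed-radix into one value
-- per field, instead of materialising the Cartesian product; alternative algorithm, same output.

-- ===== PORT A =====
-- itertools.product(*values): structural recursion, last factor varies fastest
def pyProdA : List (List String) → List (List String)
  | [] => [[]]
  | l :: ls => l.flatMap (fun v => (pyProdA ls).map (fun rest => v :: rest))

-- dict(zip(field, combo)) as an assoc list
def dictOfZip (field combo : List String) : List (String × String) :=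
  (PySem.Dict.ofList (field.zip combo)).items

def expand_combinations_in_amendments_py (amendments : List ((List (String × List String)) × (List (String × String)))) : List ((List (String × String)) × (List (String × String))) :=
  amendments.foldl (fun acc row =>
    let field := row.1.map Prod.fst      -- field, values = zip(*wrong_row.items())
    let values := row.1.map Prod.snd
    acc ++ (pyProdA values).map (fun combo => (dictOfZip field combo, row.2))) []

-- ===== PORT B =====
-- Mixed-radix decoding.  Python's //, % on the nonnegative ints here coincide with Nat / and %;
-- field[k] and values[k][...] are in range for every k < len(values), i < total, so getD is exact.
def expand_combinations_in_amendments_py_alt (amendments : List ((List (String × List String)) × (List (String × String)))) : List ((List (String × String)) × (List (String × String))) :=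
  amendments.foldl (fun acc row =>
    let field := row.1.map Prod.fst
    let values := row.1.map Prod.snd
    let sizes := values.map (·.length)
    let total := sizes.foldl (· * ·) 1
    acc ++ (List.range total).map (fun i =>
      let d := (List.range values.length).foldl (fun d k =>
        let stride := (sizes.drop (k + 1)).foldl (· * ·) 1
        d.insert (field.getD k "") ((values.getD k []).getD ((i / stride) % sizes.getD k 1) ""))
        PySem.Dict.empty
      (d.items, row.2))) []

-- ===== PRECONDITION & SPEC =====
-- Pre_ excludes amendments containing an empty wrong_row dict, on which A (and B alike)
-- raises ValueError at the zip(*wrong_row.items()) unpack.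
def Pre_expand_combinations_in_amendments_py (amendments : List ((List (String × List String)) × (List (String × String)))) : Prop :=
  ∀ row ∈ amendments, row.1 ≠ []
instance (amendments : List ((List (String × List String)) × (List (String × String)))) : Decidable (Pre_expand_combinations_in_amendments_py amendments) := by unfold Pre_expand_combinations_in_amendments_py; infer_instance

def pvWitness_expand_combinations_in_amendments_py : (List ((List (String × List String)) × (List (String × String)))) :=
  [([("a", ["1", "2"]), ("b", ["x"])], [("c", "y")])]

def Spec_expand_combinations_in_amendments_py (amendments : List ((List (String × List String)) × (List (String × String)))) (out : List ((List (String × String)) × (List (String × String)))) : Prop := out = expand_combinations_in_amendments_py_alt amendments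
instance (amendments : List ((List (String × List String)) × (List (String × String)))) (out : List ((List (String × String)) × (List (String × String)))) : Decidable (Spec_expand_combinations_in_amendments_py amendments out) := by unfold Spec_expand_combinations_in_amendments_py; infer_instance

-- ===== CLAIM (what is proved, stated in full; the proofs are below) =====
def Claim_equal_expand_combinations_in_amendments_py : Prop := ∀ (amendments : List ((List (String × List String)) × (List (String × String)))), Dom_expand_combinations_in_amendments_py amendments → Pre_expand_combinations_in_amendments_py amendments → Spec_expand_combinations_in_amendments_py amendments (expand_combinations_in_amendments_py amendments)

-- ===== LEMMAS AND PROOFS =====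

-- decodeF values i = the combo B decodes from index i (the inner dict's values, in field order)
def decodeF (values : List (List String)) (i : Nat) : List String :=
  (List.range values.length).map (fun k =>
    (values.getD k []).getD ((i / ((values.map (·.length)).drop (k + 1)).prod) % (values.map (·.length)).getD k 1) "")

theorem range_mul_flatMap (a b : Nat) :
    List.range (a * b) = (List.range a).flatMap (fun q => (List.range b).map (fun r => q * b + r)) := by
  induction a with
  | zero => simp
  | succ a ih =>
      rw [Nat.succ_mul, List.range_add, ih, List.range_succ, List.flatMap_append]
      simp

theorem getD_range_map (l : List String) : (List.range l.length).map (fun q => l.getD q "") = l := by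
  apply List.ext_getElem
  · simp
  · intro n h1 h2
    simp [List.getD_eq_getElem?_getD, h2]

theorem digit_shift (s : List Nat) (k q r : Nat) (hk : k < s.length) (hr : r < s.prod) :
    ((q * s.prod + r) / (s.drop (k + 1)).prod) % s.getD k 1
      = (r / (s.drop (k + 1)).prod) % s.getD k 1 := by
  have hsplit : s.prod = (s.take k).prod * (s[k] * (s.drop (k + 1)).prod) := by
    conv_lhs => rw [← List.take_append_drop k s]
    rw [List.prod_append, List.drop_eq_getElem_cons hk, List.prod_cons]
  have hstride : 0 < (s.drop (k + 1)).prod := by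
    rcases Nat.eq_zero_or_pos (s.drop (k + 1)).prod with h | h
    · rw [hsplit, h] at hr; simp at hr
    · exact h
  have hrw : q * s.prod + r = (s.drop (k + 1)).prod * (q * (s.take k).prod * s[k]) + r := by
    rw [hsplit]; ring
  rw [hrw, Nat.mul_add_div hstride]
  have hcomm : q * (s.take k).prod * s[k] + r / (s.drop (k + 1)).prod
      = r / (s.drop (k + 1)).prod + q * (s.take k).prod * s[k] := by ring
  rw [hcomm, List.getD_eq_getElem s 1 hk, Nat.add_mul_mod_self_right]

theorem decode_cons (l : List String) (ls : List (List String)) (q r : Nat)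
    (hq : q < l.length) (hr : r < (ls.map (·.length)).prod) :
    decodeF (l :: ls) (q * (ls.map (·.length)).prod + r) = l.getD q "" :: decodeF ls r := by
  have hb : 0 < (ls.map (·.length)).prod := Nat.pos_of_ne_zero (by omega)
  unfold decodeF
  rw [show (l :: ls).length = ls.length + 1 from rfl, List.range_succ_eq_map, List.map_cons,
      List.map_map]
  congr 1
  · -- head entry, k = 0
    simp only [List.map_cons, List.drop_succ_cons, List.drop_zero, List.getD_cons_zero]
    rw [show q * (ls.map (·.length)).prod + r
          = (ls.map (·.length)).prod * q + r by ring,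
        Nat.mul_add_div hb, Nat.div_eq_of_lt hr, Nat.add_zero, Nat.mod_eq_of_lt hq]
  · -- tail entries, k+1
    apply List.map_congr_left
    intro k hk
    have hk' : k < ls.length := List.mem_range.mp hk
    simp only [Function.comp]
    simp only [List.map_cons, List.drop_succ_cons, List.getD_cons_succ]
    congr 1
    exact digit_shift (ls.map (·.length)) k q r (by simpa using hk') hr

theorem decode_range (values : List (List String)) :
    (List.range (values.map (·.length)).prod).map (decodeF values) = pyProdA values := by
  induction values with
  | nil => simp [decodeF, pyProdA]
  | cons l ls ih =>
      have hrhs : pyProdA (l :: ls)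
          = (List.range l.length).flatMap (fun q => (pyProdA ls).map (fun rest => l.getD q "" :: rest)) := by
        conv_lhs => rw [show pyProdA (l :: ls)
            = l.flatMap (fun v => (pyProdA ls).map (fun rest => v :: rest)) from rfl,
          ← getD_range_map l]
        rw [List.flatMap_map]
      rw [List.map_cons, List.prod_cons, range_mul_flatMap, List.map_flatMap, hrhs]
      rw [List.flatMap_def, List.flatMap_def]
      apply congrArg List.flatten
      apply List.map_congr_left
      intro q hq
      have hstep : ∀ r ∈ List.range (ls.map (·.length)).prod,
          (decodeF (l :: ls) ∘ fun r => q * (ls.map (·.length)).prod + r) r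
            = ((fun rest => l.getD q "" :: rest) ∘ decodeF ls) r := by
        intro r hr
        exact decode_cons l ls q r (List.mem_range.mp hq) (List.mem_range.mp hr)
      rw [List.map_map, List.map_congr_left hstep, ← List.map_map, ih]

-- B's inner insert loop builds exactly dict(zip(field, decodeF values i))
theorem foldl_insert_range (field : List String) (g : Nat → String) :
    (List.range field.length).foldl (fun d k => d.insert (field.getD k "") (g k)) PySem.Dict.empty
      = PySem.Dict.ofList (field.zip ((List.range field.length).map g)) := by
  have hz : field.zip ((List.range field.length).map g)
      = (List.range field.length).map (fun k => (field.getD k "", g k)) := by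
    conv_lhs => rw [← getD_range_map field]
    simp only [List.length_map, List.length_range]
    rw [List.zip_map']
  rw [hz, show (PySem.Dict.ofList ((List.range field.length).map (fun k => (field.getD k "", g k))) : PySem.Dict String String)
        = ((List.range field.length).map (fun k => (field.getD k "", g k))).foldl (fun d p => d.insert p.1 p.2) PySem.Dict.empty from rfl,
      List.foldl_map]

-- ===== VERDICT (by name: the statement is the Claim_ definition above) =====
theorem expand_combinations_in_amendments_py_spec : Claim_equal_expand_combinations_in_amendments_py := by
  intro amendments _ _
  unfold Spec_expand_combinations_in_amendments_py
  simp only [expand_combinations_in_amendments_py, expand_combinations_in_amendments_py_alt]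
  simp only [← List.prod_eq_foldl]
  congr 1
  funext acc row
  congr 1
  rw [← decode_range (row.1.map Prod.snd), List.map_map]
  apply List.map_congr_left
  intro i _
  simp only [Function.comp]
  congr 1
  have hlen : (row.1.map Prod.fst).length = (row.1.map Prod.snd).length := by simp
  have h := foldl_insert_range (row.1.map Prod.fst)
      (fun k => (((row.1.map Prod.snd).getD k []).getD
        ((i / (((row.1.map Prod.snd).map (·.length)).drop (k + 1)).prod)
          % ((row.1.map Prod.snd).map (·.length)).getD k 1) ""))
  rw [hlen] at h
  rw [h]
  rfl
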